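-- pv_equiv track=rewrite | github.com/reynaldocv/leetcode | 1000-1999/1370. [Easy] Increasing Decreasing String.py | sortString
-- ===== SOURCE A (Python) =====
-- def sortString(s: str) -> str:
--     dic = {}
--     for i in s:
--         dic[i] = dic.get(i, 0) + 1
--
--     ans = "";
--     while len(dic) > 0:
--         for a in sorted(dic.keys()):
--             ans += a
--             dic[a] -= 1
--             if dic[a] == 0:
--                 del dic[a]
--         for a in sorted(dic.keys(), reverse = True):
--             ans += a
--             dic[a] -= 1
--             if dic[a] == 0:
--                 del dic[a]
--     return ans
-- ===== SOURCE B (Python) =====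
-- def sortString(s: str) -> str:
--     counts = {}
--     for c in s:
--         counts[c] = counts.get(c, 0) + 1
--     m = max(counts.values(), default=0)
--     parts = []
--     for p in range(1, m + 1):
--         letters = sorted(c for c in counts if counts[c] >= p)
--         if p % 2 == 0:
--             letters.reverse()
--         parts.append("".join(letters))
--     return "".join(parts)
-- ===== Notes on version B (the rewrite author's own statement) =====
-- stated objective: alternative
-- what changed: B never mutates or deletes counts: it takes m = max count and emits pass p = 1..m (ascending for odd p, descending by reversing for even p) as the sorted letters whose count is at least p, instead of A's destructive decrement-and-delete while loop over a shrinking dict.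
import Mathlib
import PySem

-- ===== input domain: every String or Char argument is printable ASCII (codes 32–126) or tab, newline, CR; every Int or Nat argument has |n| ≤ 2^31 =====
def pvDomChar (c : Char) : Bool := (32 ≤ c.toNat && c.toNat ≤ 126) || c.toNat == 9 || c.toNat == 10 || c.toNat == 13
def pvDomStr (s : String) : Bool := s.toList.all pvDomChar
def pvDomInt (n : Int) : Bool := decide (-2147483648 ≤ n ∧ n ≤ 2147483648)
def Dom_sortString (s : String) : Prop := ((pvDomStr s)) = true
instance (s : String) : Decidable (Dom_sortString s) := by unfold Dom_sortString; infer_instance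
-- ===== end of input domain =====

-- B replaces A's destructive decrement-and-delete while loop by threshold passes over an
-- immutable counter (pass p emits the sorted letters with count ≥ p, reversed for even p);
-- alternative decomposition, no speed claim. Equal return values are proved below.

-- ===== PORT A =====
-- the counting loop: dic[i] = dic.get(i, 0) + 1
def pvCountsA (cs : List Char) : PySem.Dict Char Int :=
  cs.foldl (fun d c => d.insert c (d.getD c 0 + 1)) PySem.Dict.empty

-- loop body shared by both for-loops: ans += a; dic[a] -= 1; if dic[a] == 0: del dic[a]
def pvPassStep (st : List Char × PySem.Dict Char Int) (a : Char) :
    List Char × PySem.Dict Char Int :=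
  let d := st.2.insert a (st.2.getD a 0 - 1)
  if d.getD a 0 = 0 then (st.1 ++ [a], d.erase a) else (st.1 ++ [a], d)

-- the while loop; the fuel only makes it total (len(s)+1 iterations always suffice, proved below)
def pvLoopA : Nat → PySem.Dict Char Int → List Char → List Char
  | 0, _, ans => ans
  | Nat.succ n, d, ans =>
    if 0 < d.size then
      let st1 := (PySem.List.sorted d.keys (fun c => c) false).foldl pvPassStep (ans, d)
      let st2 := (PySem.List.sorted st1.2.keys (fun c => c) true).foldl pvPassStep st1
      pvLoopA n st2.2 st2.1
    else ans

-- ans is built as a List Char; the final String.ofList is the only string step (exact)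
def sortString (s : String) : String :=
  String.ofList (pvLoopA (s.toList.length + 1) (pvCountsA s.toList) [])

-- ===== PORT B =====
-- B's counting loop is the same code as A's; it reuses pvCountsA
-- one pass: letters = sorted(c for c in counts if counts[c] >= p); reversed in place when p % 2 == 0
def pvPassB (counts : PySem.Dict Char Int) (p : Int) : List Char :=
  let letters := PySem.List.sorted
    (counts.keys.filter (fun c => decide (p ≤ counts.getD c 0))) (fun c => c) false
  if PySem.Int.mod p 2 == 0 then letters.reverse else letters

-- parts collected by the for-loop; "".join(parts) is List.flatten + String.ofList (exact)
def sortString_alt (s : String) : String :=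
  let counts := pvCountsA s.toList
  let m := PySem.List.maxD counts.values (fun v => v) 0
  let parts := (PySem.List.pyRange 1 (m + 1) 1).foldl
    (fun acc p => acc ++ [pvPassB counts p]) ([] : List (List Char))
  String.ofList parts.flatten

-- ===== PRECONDITION & SPEC =====
def Spec_sortString (s : String) (out : String) : Prop := out = sortString_alt s
instance (s : String) (out : String) : Decidable (Spec_sortString s out) := by unfold Spec_sortString; infer_instance

-- ===== CLAIM (what is proved, stated in full; the proofs are below) =====
def Claim_equal_sortString : Prop := ∀ (s : String), Dom_sortString s → Spec_sortString s (sortString s)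

-- ===== LEMMAS AND PROOFS =====

theorem pvGet?_erase (d : PySem.Dict Char Int) (k k' : Char) :
    (d.erase k).get? k' = if k' = k then none else d.get? k' := by
  obtain ⟨items⟩ := d
  simp only [PySem.Dict.erase, PySem.Dict.get?]
  induction items with
  | nil => simp
  | cons p t ih =>
    by_cases hk : p.1 = k <;> by_cases h2 : p.1 = k' <;> by_cases h' : k' = k <;>
      simp_all

theorem pvGetD_erase_self (d : PySem.Dict Char Int) (k : Char) (d0 : Int) :
    (d.erase k).getD k d0 = d0 := by
  simp [PySem.Dict.getD, pvGet?_erase]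

theorem pvGetD_erase_of_ne (d : PySem.Dict Char Int) {k k' : Char} (h : k' ≠ k) (d0 : Int) :
    (d.erase k).getD k' d0 = d.getD k' d0 := by
  simp [PySem.Dict.getD, pvGet?_erase, h]

theorem pvMem_keys_erase (d : PySem.Dict Char Int) (k k' : Char) :
    k' ∈ (d.erase k).keys ↔ k' ≠ k ∧ k' ∈ d.keys := by
  obtain ⟨items⟩ := d
  simp only [PySem.Dict.erase, PySem.Dict.keys, List.mem_map, List.mem_filter]
  constructor
  · rintro ⟨p, ⟨hp, hne⟩, rfl⟩
    exact ⟨by simpa using hne, p, hp, rfl⟩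
  · rintro ⟨hne, p, hp, rfl⟩
    exact ⟨p, ⟨hp, by simpa using hne⟩, rfl⟩

theorem pvNodup_keys_erase (d : PySem.Dict Char Int) (k : Char) (h : d.keys.Nodup) :
    (d.erase k).keys.Nodup := by
  obtain ⟨items⟩ := d
  simp only [PySem.Dict.erase, PySem.Dict.keys] at *
  exact List.Nodup.sublist (List.Sublist.map _ (List.filter_sublist)) h

theorem pvGetD_not_mem (d : PySem.Dict Char Int) {c : Char} (h : c ∉ d.keys) :
    d.getD c 0 = 0 := by
  apply PySem.Dict.getD_of_not_contains
  by_contra hc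
  exact h ((PySem.Dict.contains_iff_mem_keys d c).mp (by simpa using hc))

theorem pvPassStep_eq (st : List Char × PySem.Dict Char Int) (a : Char) :
    pvPassStep st a = (st.1 ++ [a],
      if st.2.getD a 0 - 1 = 0 then (st.2.insert a (st.2.getD a 0 - 1)).erase a
      else st.2.insert a (st.2.getD a 0 - 1)) := by
  unfold pvPassStep
  simp only [PySem.Dict.getD_insert_self]
  split <;> simp

theorem pvPassStep_getD (st : List Char × PySem.Dict Char Int) (a c : Char) :
    (pvPassStep st a).2.getD c 0 =
      if c = a then st.2.getD a 0 - 1 else st.2.getD c 0 := by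
  rw [pvPassStep_eq]
  dsimp only
  by_cases h : c = a
  · rw [if_pos h]
    split_ifs with hz
    · rw [h, pvGetD_erase_self]; omega
    · rw [h, PySem.Dict.getD_insert]; simp
  · rw [if_neg h]
    split_ifs with hz
    · rw [pvGetD_erase_of_ne _ h, PySem.Dict.getD_insert]; simp [h]
    · rw [PySem.Dict.getD_insert]; simp [h]

theorem pvPassStep_mem_keys (st : List Char × PySem.Dict Char Int) (a c : Char)
    (ha : a ∈ st.2.keys) :
    (c ∈ (pvPassStep st a).2.keys ↔ c ∈ st.2.keys ∧ (c = a → st.2.getD a 0 ≠ 1)) := by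
  rw [pvPassStep_eq]
  dsimp only
  split_ifs with hz
  · rw [pvMem_keys_erase, PySem.Dict.mem_keys_insert]
    constructor
    · rintro ⟨hne, hm⟩
      exact ⟨hm.resolve_left hne, fun he => absurd he hne⟩
    · rintro ⟨hm, himp⟩
      exact ⟨fun he => himp he (by omega), Or.inr hm⟩
  · rw [PySem.Dict.mem_keys_insert]
    constructor
    · rintro (rfl | hm)
      · exact ⟨ha, fun _ h1 => hz (by omega)⟩
      · exact ⟨hm, fun he h1 => hz (by omega)⟩
    · rintro ⟨hm, _⟩; exact Or.inr hm

theorem pvPassStep_nodup (st : List Char × PySem.Dict Char Int) (a : Char)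
    (h : st.2.keys.Nodup) : (pvPassStep st a).2.keys.Nodup := by
  rw [pvPassStep_eq]
  split_ifs
  · exact pvNodup_keys_erase _ _ (PySem.Dict.nodup_keys_insert _ _ _ h)
  · exact PySem.Dict.nodup_keys_insert _ _ _ h

theorem pvPass_fst (ks : List Char) (st : List Char × PySem.Dict Char Int) :
    (ks.foldl pvPassStep st).1 = st.1 ++ ks := by
  induction ks generalizing st with
  | nil => simp
  | cons a t ih => rw [List.foldl_cons, ih, pvPassStep_eq]; simp

theorem pvPass_getD (ks : List Char) (st : List Char × PySem.Dict Char Int) (c : Char)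
    (hnd : ks.Nodup) :
    (ks.foldl pvPassStep st).2.getD c 0 =
      if c ∈ ks then st.2.getD c 0 - 1 else st.2.getD c 0 := by
  induction ks generalizing st with
  | nil => simp
  | cons a t ih =>
    rw [List.foldl_cons, ih _ hnd.of_cons]
    by_cases hc : c = a
    · subst hc
      have hnm : c ∉ t := (List.nodup_cons.mp hnd).1
      simp [hnm, pvPassStep_getD]
    · by_cases ht : c ∈ t <;> simp [hc, ht, pvPassStep_getD]

theorem pvPass_mem_keys (ks : List Char) (st : List Char × PySem.Dict Char Int) (c : Char)
    (hnd : ks.Nodup) (hsub : ∀ a ∈ ks, a ∈ st.2.keys) :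
    (c ∈ (ks.foldl pvPassStep st).2.keys ↔
      c ∈ st.2.keys ∧ (c ∈ ks → st.2.getD c 0 ≠ 1)) := by
  induction ks generalizing st with
  | nil => simp
  | cons a t ih =>
    have ha : a ∈ st.2.keys := hsub a (by simp)
    rw [List.foldl_cons, ih _ hnd.of_cons]
    · rw [pvPassStep_mem_keys _ _ _ ha]
      have hat : a ∉ t := (List.nodup_cons.mp hnd).1
      by_cases hc : c = a
      · subst hc
        simp [hat, pvPassStep_getD]
      · constructor
        · rintro ⟨⟨hm, _⟩, himp⟩
          refine ⟨hm, fun hin h1 => ?_⟩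
          rcases List.mem_cons.mp hin with rfl | hint
          · exact absurd rfl hc
          · have := himp hint
            rw [pvPassStep_getD] at this
            simp [hc, h1] at this
        · rintro ⟨hm, himp⟩
          refine ⟨⟨hm, fun he => absurd he hc⟩, fun hint => ?_⟩
          rw [pvPassStep_getD]
          simp only [hc, if_false]
          exact himp (by simp [hint])
    · intro b hb
      rw [pvPassStep_mem_keys _ _ _ ha]
      have hba : b ≠ a := fun he => (List.nodup_cons.mp hnd).1 (he ▸ hb)
      exact ⟨hsub b (by simp [hb]), fun he => absurd he hba⟩

theorem pvPass_nodup (ks : List Char) (st : List Char × PySem.Dict Char Int)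
    (h : st.2.keys.Nodup) : (ks.foldl pvPassStep st).2.keys.Nodup := by
  induction ks generalizing st with
  | nil => simpa
  | cons a t ih => exact List.foldl_cons .. ▸ ih _ (pvPassStep_nodup _ _ h)

theorem pvMaxD_nil : PySem.List.maxD ([] : List Int) (fun x => x) 0 = 0 := rfl

theorem pvMaxD_ub (xs : List Int) (v : Int) (hv : v ∈ xs) :
    v ≤ PySem.List.maxD xs (fun x => x) 0 := by
  unfold PySem.List.maxD
  cases hm : PySem.List.max? xs (fun x => x) with
  | none => exact absurd ((PySem.List.max?_eq_none_iff xs _).mp hm ▸ hv) (List.not_mem_nil)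
  | some m => simpa using PySem.List.max?_isMax hm v hv

theorem pvMaxD_mem (xs : List Int) (h : xs ≠ []) :
    PySem.List.maxD xs (fun x => x) 0 ∈ xs := by
  unfold PySem.List.maxD
  cases hm : PySem.List.max? xs (fun x => x) with
  | none => exact absurd ((PySem.List.max?_eq_none_iff xs _).mp hm) h
  | some m => simpa using PySem.List.max?_mem hm

theorem pvSorted_pairwise_lt (xs : List Char) (hnd : xs.Nodup) :
    (PySem.List.sorted xs (fun c => c) false).Pairwise (· < ·) := by
  have h1 := PySem.List.sorted_pairwise xs (fun c => c)
  have h2 : (PySem.List.sorted xs (fun c => c) false).Nodup :=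
    (PySem.List.sorted_perm xs (fun c => c) false).nodup_iff.mpr hnd
  exact (h1.and h2).imp (fun h => lt_of_le_of_ne h.1 h.2)

theorem pvMod_shift (p : Int) : PySem.Int.mod (p + 2) 2 = PySem.Int.mod p 2 := by
  rw [PySem.Int.mod_eq_emod_of_pos (by omega : (0:Int) < 2),
    PySem.Int.mod_eq_emod_of_pos (by omega : (0:Int) < 2)]
  omega

theorem pvLoopA_eq (n : Nat) (d : PySem.Dict Char Int) (ans : List Char)
    (hnd : d.keys.Nodup) (hpos : ∀ c ∈ d.keys, 1 ≤ d.getD c 0)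
    (hfuel : PySem.List.maxD d.values (fun v => v) 0 ≤ 2 * (n : Int)) :
    pvLoopA n d ans = ans ++
      ((PySem.List.pyRange 1 (PySem.List.maxD d.values (fun v => v) 0 + 1) 1).map
        (pvPassB d)).flatten := by
  induction n generalizing d ans with
  | zero =>
    rw [PySem.List.pyRange_one_eq_nil (by simpa using hfuel)]
    simp [pvLoopA]
  | succ n ih =>
    set m := PySem.List.maxD d.values (fun v => v) 0 with hm
    have hvals : d.values = d.keys.map (fun k => d.getD k 0) :=
      PySem.Dict.values_eq_map_keys d hnd 0
    have hub : ∀ c ∈ d.keys, d.getD c 0 ≤ m := by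
      intro c hc
      exact pvMaxD_ub _ _ (by rw [hvals]; exact List.mem_map_of_mem hc)
    by_cases hsz : 0 < d.size
    · -- the dict is nonempty
      have hitems : d.items ≠ [] := by
        intro h
        rw [PySem.Dict.size, h] at hsz
        simp at hsz
      have hvne : d.values ≠ [] := by
        simp [PySem.Dict.values, hitems]
      obtain ⟨k0, hk0, hk0v⟩ : ∃ k0 ∈ d.keys, d.getD k0 0 = m := by
        have hmm : m ∈ d.values := pvMaxD_mem _ hvne
        rw [hvals] at hmm
        exact List.mem_map.mp hmm
      have hm1 : 1 ≤ m := le_trans (hpos k0 hk0) (hub k0 hk0)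
      -- the two passes
      set asc := PySem.List.sorted d.keys (fun c => c) false with hasc
      set st1 := asc.foldl pvPassStep (ans, d) with hst1
      set desc := PySem.List.sorted st1.2.keys (fun c => c) true with hdesc
      set st2 := desc.foldl pvPassStep st1 with hst2
      have hstep : pvLoopA (n + 1) d ans = pvLoopA n st2.2 st2.1 := by
        simp only [pvLoopA, if_pos hsz]
        rfl
      have hasc_nd : asc.Nodup := (PySem.List.sorted_perm _ _ _).nodup_iff.mpr hnd
      have hasc_mem : ∀ c, c ∈ asc ↔ c ∈ d.keys := fun c => PySem.List.mem_sorted _ _ _ _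
      have h1getD : ∀ c, st1.2.getD c 0 =
          if c ∈ d.keys then d.getD c 0 - 1 else d.getD c 0 := by
        intro c
        rw [hst1, pvPass_getD _ _ _ hasc_nd]
        by_cases h : c ∈ d.keys <;> simp [hasc_mem, h]
      have h1keys : ∀ c, c ∈ st1.2.keys ↔ c ∈ d.keys ∧ d.getD c 0 ≠ 1 := by
        intro c
        rw [hst1, pvPass_mem_keys _ _ _ hasc_nd (fun a ha => (hasc_mem a).mp ha)]
        simp only [hasc_mem]
        tauto
      have h1nd : st1.2.keys.Nodup := pvPass_nodup _ _ hnd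
      have hdesc_nd : desc.Nodup := (PySem.List.sorted_perm _ _ _).nodup_iff.mpr h1nd
      have hdesc_mem : ∀ c, c ∈ desc ↔ c ∈ st1.2.keys := fun c => PySem.List.mem_sorted _ _ _ _
      have h2getD : ∀ c, st2.2.getD c 0 =
          if 3 ≤ d.getD c 0 then d.getD c 0 - 2 else 0 := by
        intro c
        rw [hst2, pvPass_getD _ _ _ hdesc_nd]
        by_cases hk : c ∈ d.keys
        · have hc1 := hpos c hk
          by_cases h3 : 3 ≤ d.getD c 0
          · have : c ∈ desc := by
              rw [hdesc_mem, h1keys]; exact ⟨hk, by omega⟩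
            simp [this, h1getD, hk, h3]; omega
          · by_cases h2 : d.getD c 0 = 2
            · have : c ∈ desc := by
                rw [hdesc_mem, h1keys]; exact ⟨hk, by omega⟩
              simp [this, h1getD, hk, h3]; omega
            · have h1 : d.getD c 0 = 1 := by omega
              have : c ∉ desc := by
                rw [hdesc_mem, h1keys]; rintro ⟨-, hne⟩; exact hne h1
              simp [this, h1getD, hk, h1]
        · have h0 : d.getD c 0 = 0 := pvGetD_not_mem d hk
          have : c ∉ desc := by
            rw [hdesc_mem, h1keys]; rintro ⟨hk', -⟩; exact hk hk'
          simp [this, h1getD, hk, h0]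
      have h2keys : ∀ c, c ∈ st2.2.keys ↔ c ∈ d.keys ∧ 3 ≤ d.getD c 0 := by
        intro c
        rw [hst2, pvPass_mem_keys _ _ _ hdesc_nd (fun a ha => (hdesc_mem a).mp ha), h1keys]
        constructor
        · rintro ⟨⟨hk, hne⟩, himp⟩
          have hc1 := hpos c hk
          refine ⟨hk, ?_⟩
          by_contra h3
          have h2 : d.getD c 0 = 2 := by omega
          exact himp ((hdesc_mem c).mpr ((h1keys c).mpr ⟨hk, by omega⟩)) (by rw [h1getD]; simp [hk]; omega)
        · rintro ⟨hk, h3⟩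
          refine ⟨⟨hk, by omega⟩, fun _ => ?_⟩
          rw [h1getD]; simp [hk]; omega
      have h2nd : st2.2.keys.Nodup := pvPass_nodup _ _ h1nd
      have h2pos : ∀ c ∈ st2.2.keys, 1 ≤ st2.2.getD c 0 := by
        intro c hc
        rw [h2keys] at hc
        rw [h2getD]
        simp [hc.2]; omega
      have h2vals : st2.2.values = st2.2.keys.map (fun k => st2.2.getD k 0) :=
        PySem.Dict.values_eq_map_keys _ h2nd 0
      -- the new maximum
      have hm2 : PySem.List.maxD st2.2.values (fun v => v) 0 = if 3 ≤ m then m - 2 else 0 := by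
        by_cases h3m : 3 ≤ m
        · rw [if_pos h3m]
          have hk0' : k0 ∈ st2.2.keys := (h2keys k0).mpr ⟨hk0, by omega⟩
          have hmem : m - 2 ∈ st2.2.values := by
            rw [h2vals]
            have : st2.2.getD k0 0 = m - 2 := by rw [h2getD]; simp [hk0v, h3m]
            exact this ▸ List.mem_map_of_mem hk0'
          have hle : m - 2 ≤ PySem.List.maxD st2.2.values (fun v => v) 0 := pvMaxD_ub _ _ hmem
          have hge : PySem.List.maxD st2.2.values (fun v => v) 0 ≤ m - 2 := by
            have hne : st2.2.values ≠ [] := fun h => by simp [h] at hmem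
            have hmx : PySem.List.maxD st2.2.values (fun v => v) 0 ∈
                st2.2.keys.map (fun k => st2.2.getD k 0) := by
              rw [← h2vals]; exact pvMaxD_mem _ hne
            obtain ⟨k, hk, hkv⟩ := List.mem_map.mp hmx
            have hk1 := hub k ((h2keys k).mp hk).1
            have hk3 := ((h2keys k).mp hk).2
            rw [← hkv, h2getD]
            rw [if_pos hk3]
            omega
          omega
        · rw [if_neg h3m]
          have hke : st2.2.keys = [] := by
            rw [List.eq_nil_iff_forall_not_mem]
            intro c hc
            rw [h2keys] at hc
            exact h3m (le_trans hc.2 (hub c hc.1))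
          have hie : st2.2.items = [] := by
            have := hke
            rw [PySem.Dict.keys] at this
            exact List.map_eq_nil_iff.mp this
          simp [PySem.Dict.values, hie]
      -- strings produced by the two passes
      have hs1 : st1.1 = ans ++ asc := pvPass_fst asc (ans, d)
      have hs2 : st2.1 = (ans ++ asc) ++ desc := by rw [hst2, pvPass_fst, hs1]
      have hP1 : pvPassB d 1 = asc := by
        simp only [pvPassB, show (PySem.Int.mod 1 2 == 0) = false from by decide,
          Bool.false_eq_true, if_false]
        rw [List.filter_eq_self.mpr (fun c hc => decide_eq_true (hpos c hc))]
      have hfltnd : (d.keys.filter (fun c => decide ((2:Int) ≤ d.getD c 0))).Nodup :=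
        hnd.filter _
      have hP2 : pvPassB d 2 = desc := by
        simp only [pvPassB, show (PySem.Int.mod 2 2 == 0) = true from by decide, if_true]
        rw [hdesc]
        refine (PySem.List.sorted_rev_eq_of_perm_of_pairwise_gt _ _ (fun c => c) ?_ ?_).symm
        · refine (List.reverse_perm _).trans ((PySem.List.sorted_perm _ _ _).trans ?_)
          rw [List.perm_ext_iff_of_nodup hfltnd h1nd]
          intro c
          rw [List.mem_filter, h1keys, decide_eq_true_eq]
          constructor
          · rintro ⟨hk, h2⟩; exact ⟨hk, by omega⟩
          · rintro ⟨hk, h2⟩; have := hpos c hk; exact ⟨hk, by omega⟩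
        · rw [List.pairwise_reverse]
          exact pvSorted_pairwise_lt _ hfltnd
      have hP3 : ∀ k : Nat, pvPassB st2.2 (1 + (k : Int)) = pvPassB d (3 + (k : Int)) := by
        intro k
        have hk0 : (0 : Int) ≤ (k : Int) := Int.natCast_nonneg k
        have hmod : PySem.Int.mod (3 + (k : Int)) 2 = PySem.Int.mod (1 + (k : Int)) 2 := by
          rw [show (3 : Int) + (k : Int) = (1 + (k : Int)) + 2 from by ring, pvMod_shift]
        have hflt : PySem.List.sorted
            (st2.2.keys.filter (fun c => decide ((1 + (k : Int)) ≤ st2.2.getD c 0)))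
            (fun c => c) false =
            PySem.List.sorted
            (d.keys.filter (fun c => decide ((3 + (k : Int)) ≤ d.getD c 0)))
            (fun c => c) false := by
          refine PySem.List.sorted_eq_sorted_of_perm _ _ (fun c => c) (fun a b h => h) ?_
          rw [List.perm_ext_iff_of_nodup (h2nd.filter _) (hnd.filter _)]
          intro c
          simp only [List.mem_filter, h2keys, decide_eq_true_eq]
          constructor
          · rintro ⟨⟨hk, h3⟩, hp⟩
            rw [h2getD, if_pos h3] at hp
            exact ⟨hk, by omega⟩
          · rintro ⟨hk, hp⟩
            have h3 : 3 ≤ d.getD c 0 := by omega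
            exact ⟨⟨hk, h3⟩, by rw [h2getD, if_pos h3]; omega⟩
        simp only [pvPassB, hmod, hflt]
      rw [hstep, ih st2.2 st2.1 h2nd h2pos (by rw [hm2]; push_cast at hfuel ⊢; split_ifs <;> omega)]
      rw [hs2, hm2]
      by_cases h3m : 3 ≤ m
      · rw [if_pos h3m]
        rw [show PySem.List.pyRange 1 (m + 1) 1 = 1 :: PySem.List.pyRange 2 (m + 1) 1 from
          PySem.List.pyRange_one_cons (by omega)]
        rw [show PySem.List.pyRange 2 (m + 1) 1 = 2 :: PySem.List.pyRange 3 (m + 1) 1 from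
          PySem.List.pyRange_one_cons (by omega)]
        rw [PySem.List.pyRange_one 1 (m - 2 + 1), PySem.List.pyRange_one 3 (m + 1)]
        simp only [List.map_map, List.map_cons, List.flatten_cons]
        rw [hP1, hP2]
        rw [show (m - 2 + 1 - 1) = m + 1 - 3 from by ring]
        have hmc : List.map (pvPassB st2.2 ∘ fun k : Nat => 1 + (k : Int))
            (List.range (m + 1 - 3).toNat) =
            List.map (pvPassB d ∘ fun k : Nat => 3 + (k : Int))
            (List.range (m + 1 - 3).toNat) :=
          List.map_congr_left (fun k _ => by
            simp only [Function.comp_apply]; exact hP3 k)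
        rw [hmc]
        simp [List.append_assoc]
      · rw [if_neg h3m]
        rw [PySem.List.pyRange_one_eq_nil (by omega : (0:Int) + 1 ≤ 1)]
        simp only [List.map_nil, List.flatten_nil, List.append_nil]
        by_cases h2m : 2 ≤ m
        · have hmeq : m = 2 := by omega
          rw [hmeq]
          rw [show PySem.List.pyRange 1 (2 + 1) 1 = 1 :: PySem.List.pyRange 2 (2 + 1) 1 from
            PySem.List.pyRange_one_cons (by omega)]
          rw [show PySem.List.pyRange 2 (2 + 1) 1 = 2 :: PySem.List.pyRange 3 (2 + 1) 1 from
            PySem.List.pyRange_one_cons (by omega)]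
          rw [PySem.List.pyRange_one_eq_nil (by omega : (2:Int) + 1 ≤ 3)]
          simp [hP1, hP2, List.append_assoc]
        · have hmeq : m = 1 := by omega
          have hk1e : st1.2.keys = [] := by
            rw [List.eq_nil_iff_forall_not_mem]
            intro c hc
            rw [h1keys] at hc
            have := hpos c hc.1
            have := hub c hc.1
            omega
          have hdnil : desc = [] := by
            rw [hdesc, hk1e]
            rfl
          rw [hmeq]
          rw [show PySem.List.pyRange 1 (1 + 1) 1 = 1 :: PySem.List.pyRange 2 (1 + 1) 1 from
            PySem.List.pyRange_one_cons (by omega)]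
          rw [PySem.List.pyRange_one_eq_nil (by omega : (1:Int) + 1 ≤ 2)]
          simp [hP1, hdnil]
    · -- empty dict: the loop stops and m = 0
      have hitems : d.items = [] := by
        rw [PySem.Dict.size] at hsz
        exact List.eq_nil_of_length_eq_zero (by omega)
      have hv : d.values = [] := by simp [PySem.Dict.values, hitems]
      rw [hm, hv]
      rw [PySem.List.pyRange_one_eq_nil (by norm_num [pvMaxD_nil])]
      simp [pvLoopA, hsz]

theorem sortString_eq_alt (s : String) : sortString s = sortString_alt s := by
  unfold sortString sortString_alt
  have hctr : pvCountsA s.toList = PySem.Dict.counter s.toList :=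
    PySem.Dict.foldl_insert_getD_add_one_eq_counter s.toList
  rw [hctr]
  set cs := s.toList with hcs
  set d := PySem.Dict.counter cs with hd
  have hnd : d.keys.Nodup := PySem.Dict.nodup_keys_counter cs
  have hpos : ∀ c ∈ d.keys, 1 ≤ d.getD c 0 := by
    intro c hc
    rw [hd, PySem.Dict.getD_counter]
    rw [hd, PySem.Dict.keys_counter, PySem.Set.mem_ofList] at hc
    exact_mod_cast List.count_pos_iff.mpr hc
  have hub : ∀ v ∈ d.values, v ≤ (cs.length : Int) := by
    intro v hv
    rw [PySem.Dict.values_eq_map_keys d hnd 0] at hv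
    obtain ⟨k, hk, rfl⟩ := List.mem_map.mp hv
    rw [hd, PySem.Dict.getD_counter]
    exact_mod_cast List.count_le_length
  have hfuel : PySem.List.maxD d.values (fun v => v) 0 ≤ 2 * ((cs.length + 1 : Nat) : Int) := by
    by_cases hv : d.values = []
    · rw [hv, pvMaxD_nil]; positivity
    · have := hub _ (pvMaxD_mem _ hv)
      push_cast
      omega
  rw [pvLoopA_eq (cs.length + 1) d [] hnd hpos hfuel]
  have hsing : ∀ (l : List Int) (g : Int → List Char),
      (List.map (fun x => [g x]) l).flatten = List.map g l := by
    intro l g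
    induction l with
    | nil => simp
    | cons a t ih => simp [ih]
  simp [hsing]

-- ===== VERDICT (by name: the statement is the Claim_ definition above) =====
theorem sortString_spec : Claim_equal_sortString := by
  intro s _
  unfold Spec_sortString
  exact sortString_eq_alt s
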